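-- pv_equiv track=rewrite | github.com/bala8887/Hacker-Rank | Beautiful_Days_At_The_Movies.py | beautifulDays
-- ===== SOURCE A (Python) =====
-- def beautifulDays(i, j, k):
--     total=0;
--     for x in range(i,j+1):
--         y=list(str(x));
--         y.reverse();
--         z=int(''.join(str(a) for a in y));
--         #return z;
--
--         if abs(z-x)%k==0:
--             total+=1;
--     return total;
-- ===== SOURCE B (Python) =====
-- def beautifulDays(i, j, k):
--     total = 0
--     for x in range(i, j + 1):
--         rev, t = 0, x
--         while t:
--             rev = rev * 10 + t % 10
--             t //= 10
--         if abs(rev - x) % k == 0: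
--             total += 1
--     return total
-- ===== Notes on version B (the rewrite author's own statement) =====
-- stated objective: alternative
-- what changed: The reversed number is computed by an arithmetic divmod loop (rev = rev*10 + t%10; t //= 10) instead of building list(str(x)), reversing it, joining it back and re-parsing it with int().
import Mathlib
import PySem

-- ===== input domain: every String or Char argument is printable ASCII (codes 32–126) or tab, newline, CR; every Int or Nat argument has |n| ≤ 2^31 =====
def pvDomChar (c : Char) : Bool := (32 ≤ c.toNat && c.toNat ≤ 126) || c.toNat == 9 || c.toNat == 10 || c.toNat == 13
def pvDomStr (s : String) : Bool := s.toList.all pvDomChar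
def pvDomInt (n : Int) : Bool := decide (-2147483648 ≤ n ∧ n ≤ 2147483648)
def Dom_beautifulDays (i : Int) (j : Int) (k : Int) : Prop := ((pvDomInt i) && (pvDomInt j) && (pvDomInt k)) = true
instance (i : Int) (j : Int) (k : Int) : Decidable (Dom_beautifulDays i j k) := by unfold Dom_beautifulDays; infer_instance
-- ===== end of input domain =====

-- B replaces A's string-based digit reversal (list(str(x)) → reverse → join → int) by an arithmetic
-- divmod loop over the same range; same count, no string machinery.

-- ===== PORT A =====
-- int(s) is ported by an exact step-for-step clone of PySem.Int.ofChars? (its recursive digit parser is a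
-- private definition that proofs cannot cite by name); same algorithm, same values on every input.
def pvGoDigits : List Char → Bool → Nat → Option Nat
  | [], afterDigit, acc => if afterDigit = true then some acc else none
  | c :: rest, afterDigit, acc =>
    if c.isDigit = true then pvGoDigits rest true (acc * 10 + (c.toNat - '0'.toNat))
    else
      if c = '_' ∧ afterDigit = true then
        match rest with
        | d :: _ => if d.isDigit = true then pvGoDigits rest false acc else none
        | [] => none
      else none

def pvDigitsVal? : List Char → Option Nat
  | [] => none
  | cs => pvGoDigits cs false 0

def pvIntOfChars? (s : List Char) : Option Int :=
  match ((s.dropWhile PySem.Int.isIntSpace).reverse.dropWhile PySem.Int.isIntSpace).reverse with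
  | [] => none
  | c :: ds =>
    if c = '-' then (pvDigitsVal? ds).map (fun n => -(n : Int))
    else if c = '+' then (pvDigitsVal? ds).map (fun n => (n : Int))
    else (pvDigitsVal? (c :: ds)).map (fun n => (n : Int))

def beautifulDays (i : Int) (j : Int) (k : Int) : Int :=
  (PySem.List.pyRange i (j + 1) 1).foldl
    (fun total x =>
      let y := (PySem.Int.toStr x).toList
      let y := y.reverse
      let z := (pvIntOfChars? (PySem.Str.join "" (y.map (fun a => String.ofList [a]))).toList).getD 0
      if PySem.Int.mod |z - x| k = 0 then total + 1 else total)
    0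

-- ===== PORT B =====
-- 'while t: rev = rev*10 + t%10; t //= 10' — runs on x ≥ 0 for every x the claim covers (Pre_);
-- ported over Nat for termination (Source B does not terminate on negative x, which Pre_ excludes).
def pvRevLoop (t : Nat) (rev : Int) : Int :=
  if h : t = 0 then rev else pvRevLoop (t / 10) (rev * 10 + ((t % 10 : Nat) : Int))
termination_by t
decreasing_by exact Nat.div_lt_self (Nat.pos_of_ne_zero h) (by omega)

def beautifulDays_alt (i : Int) (j : Int) (k : Int) : Int :=
  (PySem.List.pyRange i (j + 1) 1).foldl
    (fun total x =>
      let rev := pvRevLoop x.toNat 0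
      if PySem.Int.mod |rev - x| k = 0 then total + 1 else total)
    0

-- ===== PRECONDITION & SPEC =====
-- Pre_ excludes exactly the inputs on which Python A raises: a nonempty range (i ≤ j) that starts below 0
-- (int(reversed str) raises ValueError on the trailing '-') or has k = 0 (ZeroDivisionError in the % test).
def Pre_beautifulDays (i : Int) (j : Int) (k : Int) : Prop := j < i ∨ (0 ≤ i ∧ k ≠ 0)
instance (i : Int) (j : Int) (k : Int) : Decidable (Pre_beautifulDays i j k) := by
  unfold Pre_beautifulDays; infer_instance

def pvWitness_beautifulDays : Int × Int × Int := (1, 9, 3)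

def Spec_beautifulDays (i : Int) (j : Int) (k : Int) (out : Int) : Prop := out = beautifulDays_alt i j k
instance (i : Int) (j : Int) (k : Int) (out : Int) : Decidable (Spec_beautifulDays i j k out) := by
  unfold Spec_beautifulDays; infer_instance

-- ===== CLAIM (what is proved, stated in full; the proofs are below) =====
def Claim_equal_beautifulDays : Prop := ∀ (i : Int) (j : Int) (k : Int), Dom_beautifulDays i j k → Pre_beautifulDays i j k → Spec_beautifulDays i j k (beautifulDays i j k)

-- ===== LEMMAS AND PROOFS =====

-- str(n) for n ≥ 0, as a structural recursion on the number (big-endian digit characters)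
def pvChars (n : Nat) : List Char :=
  if _h : n < 10 then [Nat.digitChar n] else pvChars (n / 10) ++ [Nat.digitChar (n % 10)]
termination_by n
decreasing_by exact Nat.div_lt_self (by omega) (by omega)

-- the arithmetic digit-reversal, on Nat
def pvRevNat (t : Nat) (acc : Nat) : Nat :=
  if h : t = 0 then acc else pvRevNat (t / 10) (acc * 10 + t % 10)
termination_by t
decreasing_by exact Nat.div_lt_self (Nat.pos_of_ne_zero h) (by omega)

lemma pvToDigitsCore_eq : ∀ (f n : Nat) (ds : List Char), n < f →
    Nat.toDigitsCore 10 f n ds = pvChars n ++ ds := by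
  intro f
  induction f with
  | zero => omega
  | succ f ih =>
    intro n ds hn
    rw [Nat.toDigitsCore]
    by_cases h10 : n < 10
    · rw [if_pos (by omega)]
      rw [pvChars, dif_pos h10, Nat.mod_eq_of_lt h10]
      rfl
    · rw [if_neg (by omega)]
      rw [ih (n / 10) _ (by omega)]
      conv_rhs => rw [pvChars]
      rw [dif_neg h10]
      simp

lemma pvToDigits_eq (n : Nat) : Nat.toDigits 10 n = pvChars n := by
  have := pvToDigitsCore_eq (n + 1) n [] (by omega)
  simpa [Nat.toDigits] using this

lemma pvDigitChar_isDigit {d : Nat} (hd : d < 10) : (Nat.digitChar d).isDigit = true := by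
  interval_cases d <;> decide

lemma pvDigitChar_val {d : Nat} (hd : d < 10) : (Nat.digitChar d).toNat - '0'.toNat = d := by
  interval_cases d <;> decide

lemma pvChars_all_digit (n : Nat) : ∀ c ∈ pvChars n, c.isDigit = true := by
  induction n using pvChars.induct with
  | case1 n h =>
    rw [pvChars, dif_pos h]
    intro c hc
    simp at hc
    subst hc
    exact pvDigitChar_isDigit h
  | case2 n h ih =>
    rw [pvChars, dif_neg h]
    intro c hc
    rcases List.mem_append.mp hc with h1 | h1
    · exact ih c h1
    · simp at h1
      subst h1
      exact pvDigitChar_isDigit (Nat.mod_lt _ (by omega))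

lemma pvChars_ne_nil (n : Nat) : pvChars n ≠ [] := by
  rw [pvChars]
  split <;> simp

lemma pvChars_reverse_lt {n : Nat} (h : n < 10) : (pvChars n).reverse = [Nat.digitChar n] := by
  rw [pvChars, dif_pos h]; rfl

lemma pvChars_reverse_ge {n : Nat} (h : ¬ n < 10) :
    (pvChars n).reverse = Nat.digitChar (n % 10) :: (pvChars (n / 10)).reverse := by
  rw [pvChars, dif_neg h]
  simp

lemma pvGo_digit {d : Nat} (hd : d < 10) (rest : List Char) (b : Bool) (acc : Nat) :
    pvGoDigits (Nat.digitChar d :: rest) b acc = pvGoDigits rest true (acc * 10 + d) := by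
  simp only [pvGoDigits]
  rw [if_pos (pvDigitChar_isDigit hd), pvDigitChar_val hd]

lemma pvGo_pvChars (n : Nat) (hn : 0 < n) : ∀ (b : Bool) (acc : Nat),
    pvGoDigits ((pvChars n).reverse) b acc = some (pvRevNat n acc) := by
  induction n using Nat.strong_induction_on with
  | _ n ih =>
    intro b acc
    by_cases h10 : n < 10
    · rw [pvChars_reverse_lt h10, pvGo_digit h10]
      rw [pvRevNat, dif_neg (by omega), Nat.mod_eq_of_lt h10, Nat.div_eq_of_lt h10,
        pvRevNat, dif_pos rfl]
      rfl
    · rw [pvChars_reverse_ge h10, pvGo_digit (Nat.mod_lt _ (by omega))]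
      rw [ih (n / 10) (Nat.div_lt_self hn (by omega)) (by omega) true (acc * 10 + n % 10)]
      conv_rhs => rw [pvRevNat]
      rw [dif_neg (show ¬ n = 0 by omega)]

lemma pvSpace_not_digit {c : Char} (h : PySem.Int.isIntSpace c = true) : c.isDigit = false := by
  simp [PySem.Int.isIntSpace] at h
  rcases h with ((((h | h) | h) | h) | h) | h <;> subst h <;> decide

lemma pvDropWhile_digits {l : List Char} (hd : ∀ c ∈ l, c.isDigit = true) :
    l.dropWhile PySem.Int.isIntSpace = l := by
  apply List.dropWhile_eq_self_iff.mpr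
  intro hl hsp
  have := pvSpace_not_digit hsp
  have := hd _ (List.getElem_mem hl)
  simp_all

lemma pvDigit_ne {c : Char} (hc : c.isDigit = true) : c ≠ '-' ∧ c ≠ '+' := by
  constructor <;> rintro rfl <;> exact absurd hc (by decide)

lemma pvIntOfChars?_digits {l : List Char} (hne : l ≠ []) (hd : ∀ c ∈ l, c.isDigit = true) :
    pvIntOfChars? l = (pvDigitsVal? l).map (fun n => (n : Int)) := by
  have hrev : ∀ c ∈ l.reverse, c.isDigit = true := by simpa using hd
  rw [pvIntOfChars?]
  rw [pvDropWhile_digits hd, pvDropWhile_digits hrev, List.reverse_reverse]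
  rcases l with _ | ⟨c, ds⟩
  · exact absurd rfl hne
  · have hc := hd c (by simp)
    split
    · simp_all
    · rename_i c' ds' heq
      injection heq with h1 h2
      subst h1; subst h2
      rw [if_neg (pvDigit_ne hc).1, if_neg (pvDigit_ne hc).2]

lemma pvDigitsVal?_pvChars (m : Nat) :
    pvDigitsVal? ((pvChars m).reverse) = some (pvRevNat m 0) := by
  by_cases hm : m = 0
  · subst hm
    have h0 : pvChars 0 = ['0'] := by rw [pvChars]; rfl
    have hr : pvRevNat 0 0 = 0 := by rw [pvRevNat]; simp
    rw [h0, hr]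
    decide
  · obtain ⟨c, cs, hcons⟩ := List.exists_cons_of_ne_nil
      (l := (pvChars m).reverse) (by simp [pvChars_ne_nil m])
    rw [hcons]
    simp only [pvDigitsVal?]
    rw [← hcons, pvGo_pvChars m (Nat.pos_of_ne_zero hm)]

lemma pvRevLoop_eq : ∀ (t r : Nat), pvRevLoop t (r : Int) = ((pvRevNat t r : Nat) : Int) := by
  intro t
  induction t using Nat.strong_induction_on with
  | _ t ih =>
    intro r
    by_cases h : t = 0
    · subst h
      rw [pvRevLoop, dif_pos rfl, pvRevNat, dif_pos rfl]
    · rw [pvRevLoop, dif_neg h, pvRevNat, dif_neg h]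
      have : (r : Int) * 10 + ((t % 10 : Nat) : Int) = ((r * 10 + t % 10 : Nat) : Int) := by push_cast; ring
      rw [this, ih (t / 10) (Nat.div_lt_self (Nat.pos_of_ne_zero h) (by omega))]

lemma pvJoin_singletons (l : List Char) :
    (PySem.Str.join "" (l.map (fun a => String.ofList [a]))).toList = l := by
  rw [PySem.Str.toList_join]
  have h1 : (List.map (fun a => String.ofList [a]) l).map String.toList = l.map (fun c => [c]) := by
    rw [List.map_map]
    apply List.map_congr_left
    intro a _
    exact String.toList_ofList
  have h2 : ("" : String).toList = [] := rfl
  rw [h1, h2, PySem.Chars.join_nil_singletons]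

lemma pvInner_eq (x : Int) (hx : 0 ≤ x) :
    (pvIntOfChars? (PySem.Str.join ""
        (((PySem.Int.toStr x).toList.reverse).map (fun a => String.ofList [a]))).toList).getD 0
      = pvRevLoop x.toNat 0 := by
  rw [pvJoin_singletons, PySem.Int.toList_toStr]
  have htc : PySem.Int.toChars x = pvChars x.toNat := by
    rw [PySem.Int.toChars, if_neg (by omega), pvToDigits_eq]
  rw [htc]
  rw [pvIntOfChars?_digits (fun h => pvChars_ne_nil x.toNat (by simpa using congrArg List.reverse h))
        (by simpa using pvChars_all_digit x.toNat)]
  rw [pvDigitsVal?_pvChars]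
  have h0 : ((0 : Nat) : Int) = (0 : Int) := rfl
  rw [← h0, pvRevLoop_eq]
  rfl

-- ===== VERDICT (by name: the statement is the Claim_ definition above) =====
theorem beautifulDays_spec : Claim_equal_beautifulDays := by
  unfold Claim_equal_beautifulDays Spec_beautifulDays
  intro i j k _ hpre
  unfold beautifulDays beautifulDays_alt
  rcases hpre with hlt | ⟨hi, _⟩
  · rw [PySem.List.pyRange_one_eq_nil (by omega), List.foldl_nil, List.foldl_nil]
  · apply PySem.List.foldl_congr_mem
    intro acc x hmem
    have hx : 0 ≤ x := le_trans hi (PySem.List.mem_pyRange_one.mp hmem).1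
    show (if PySem.Int.mod |((pvIntOfChars? (PySem.Str.join ""
        (((PySem.Int.toStr x).toList.reverse).map (fun a => String.ofList [a]))).toList).getD 0) - x| k = 0
        then acc + 1 else acc)
      = (if PySem.Int.mod |pvRevLoop x.toNat 0 - x| k = 0 then acc + 1 else acc)
    rw [pvInner_eq x hx]
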